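-- pv_equiv track=rewrite | github.com/monsegard/portfolio | IM/кудряшов/Кр2/шифры/caesar.py | ofb_encrypt
-- ===== SOURCE A (Python) =====
-- def encrypt(c, key, l):
--     return (c + key) % l
--
-- def ofb_encrypt(data, key, iv, l=256):
--     cypher_data = []
--     for m in data:
--         c = encrypt(iv, key, l)
--         iv = m
--         c = c ^ iv
--         cypher_data.append(c)
--     return cypher_data
-- ===== SOURCE B (Python) =====
-- def ofb_encrypt(data, key, iv, l=256):
--     # Divide and conquer: the cipher state entering any block is just the
--     # plaintext element immediately before it, so the two halves are independent.
--     data = list(data)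
--     n = len(data)
--     if n == 0:
--         return []
--     if n == 1:
--         return [((iv + key) % l) ^ data[0]]
--     k = n // 2
--     return ofb_encrypt(data[:k], key, iv, l) + ofb_encrypt(data[k:], key, data[k - 1], l)
-- ===== Notes on version B (the rewrite author's own statement) =====
-- stated objective: alternative
-- what changed: B replaces A's sequential stateful loop (mutating iv and appending to an accumulator) by a divide-and-conquer recursion: since the OFB state entering any block equals the plaintext element just before it, B splits the message in half and encrypts each half independently, seeding the right half with data[k-1].
import Mathlib
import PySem

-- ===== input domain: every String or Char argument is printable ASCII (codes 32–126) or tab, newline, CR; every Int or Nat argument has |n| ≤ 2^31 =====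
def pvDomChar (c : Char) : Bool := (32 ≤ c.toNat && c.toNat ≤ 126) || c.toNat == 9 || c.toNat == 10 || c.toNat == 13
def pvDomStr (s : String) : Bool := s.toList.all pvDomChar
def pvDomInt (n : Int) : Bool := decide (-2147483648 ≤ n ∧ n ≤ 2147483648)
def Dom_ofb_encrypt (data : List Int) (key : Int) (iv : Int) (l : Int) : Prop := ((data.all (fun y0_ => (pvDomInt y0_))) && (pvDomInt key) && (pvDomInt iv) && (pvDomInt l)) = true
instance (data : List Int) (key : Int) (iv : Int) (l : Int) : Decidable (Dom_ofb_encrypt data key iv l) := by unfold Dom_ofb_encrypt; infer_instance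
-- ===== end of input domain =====

-- B replaces A's sequential stateful loop by a divide-and-conquer recursion: the OFB
-- state entering a block is just the preceding plaintext element, so the two halves
-- are encrypted independently (objective: alternative).

-- ===== PORT A =====
def pyEncrypt (c : Int) (key : Int) (l : Int) : Int := PySem.Int.mod (c + key) l

-- loop body of A: compute c = encrypt(iv,key,l), set iv := m, append c ^ m
def ofbStep (key : Int) (l : Int) (st : Int × List Int) (m : Int) : Int × List Int :=
  let c := pyEncrypt st.1 key l
  (m, st.2 ++ [PySem.Int.bxor c m])

def ofb_encrypt (data : List Int) (key : Int) (iv : Int) (l : Int) : List Int :=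
  (data.foldl (ofbStep key l) (iv, [])).2

-- ===== PORT B =====
-- data[:k] / data[k:] become take/drop; n // 2 on the nonnegative length is Nat division;
-- data[k-1] has 0 ≤ k-1 < n, so the in-range access is ported as getD.
def ofb_encrypt_alt (data : List Int) (key : Int) (iv : Int) (l : Int) : List Int :=
  if data.length = 0 then []
  else if data.length = 1 then [PySem.Int.bxor (PySem.Int.mod (iv + key) l) (data.getD 0 0)]
  else
    let k := data.length / 2
    ofb_encrypt_alt (data.take k) key iv l ++
      ofb_encrypt_alt (data.drop k) key (data.getD (k - 1) 0) l
termination_by data.length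
decreasing_by
  · simp [List.length_take]; omega
  · simp [List.length_drop]; omega

-- ===== PRECONDITION & SPEC =====
-- Pre_ excludes exactly the inputs where A raises ZeroDivisionError: l = 0 with nonempty data.
def Pre_ofb_encrypt (data : List Int) (key : Int) (iv : Int) (l : Int) : Prop :=
  data = [] ∨ l ≠ 0
instance (data : List Int) (key : Int) (iv : Int) (l : Int) : Decidable (Pre_ofb_encrypt data key iv l) := by unfold Pre_ofb_encrypt; infer_instance
def pvWitness_ofb_encrypt : List Int × Int × Int × Int := ([5, -3, 7], 12, 9, 256)
def Spec_ofb_encrypt (data : List Int) (key : Int) (iv : Int) (l : Int) (out : List Int) : Prop := out = ofb_encrypt_alt data key iv l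
instance (data : List Int) (key : Int) (iv : Int) (l : Int) (out : List Int) : Decidable (Spec_ofb_encrypt data key iv l out) := by unfold Spec_ofb_encrypt; infer_instance

-- ===== CLAIM (what is proved, stated in full; the proofs are below) =====
def Claim_equal_ofb_encrypt : Prop := ∀ (data : List Int) (key : Int) (iv : Int) (l : Int), Dom_ofb_encrypt data key iv l → Pre_ofb_encrypt data key iv l → Spec_ofb_encrypt data key iv l (ofb_encrypt data key iv l)

-- ===== LEMMAS AND PROOFS =====
theorem ofb_fold_fst (key l : Int) :
    ∀ (d : List Int) (iv : Int) (acc : List Int),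
      (d.foldl (ofbStep key l) (iv, acc)).1 = d.getLastD iv := by
  intro d
  induction d with
  | nil => intro iv acc; simp
  | cons m rest ih =>
    intro iv acc
    rw [List.foldl_cons, List.getLastD_cons]
    exact ih m _

theorem ofb_fold_snd (key l : Int) :
    ∀ (d : List Int) (iv : Int) (acc : List Int),
      (d.foldl (ofbStep key l) (iv, acc)).2
        = acc ++ (d.foldl (ofbStep key l) (iv, [])).2 := by
  intro d
  induction d with
  | nil => intro iv acc; simp
  | cons m rest ih =>
    intro iv acc
    simp only [List.foldl_cons, ofbStep]
    rw [ih m (acc ++ _), ih m ([] ++ _)]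
    simp

theorem ofb_split (key l : Int) (xs ys : List Int) (iv : Int) :
    ofb_encrypt (xs ++ ys) key iv l
      = ofb_encrypt xs key iv l ++ ofb_encrypt ys key (xs.getLastD iv) l := by
  unfold ofb_encrypt
  rw [List.foldl_append]
  rcases hs : xs.foldl (ofbStep key l) (iv, ([] : List Int)) with ⟨a, b⟩
  have h1 : a = xs.getLastD iv := by
    have := ofb_fold_fst key l xs iv []; rw [hs] at this; simpa using this
  have h2 : (ys.foldl (ofbStep key l) (a, b)).2
      = b ++ (ys.foldl (ofbStep key l) (a, [])).2 := ofb_fold_snd key l ys a b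
  rw [h2, h1]

theorem getLastD_take (d : List Int) (k : Nat) (h1 : 1 ≤ k) (h2 : k ≤ d.length)
    (x y : Int) : (d.take k).getLastD x = d.getD (k - 1) y := by
  have hlen : (d.take k).length = k := by simp; omega
  have hk : k - 1 < d.length := by omega
  rw [List.getLastD_eq_getLast?, List.getLast?_eq_getElem?, hlen]
  rw [List.getElem?_take_of_lt (by omega), List.getD_eq_getElem?_getD]
  rw [List.getElem?_eq_getElem hk]
  rfl

theorem alt_eq_ofb (key l : Int) :
    ∀ (n : Nat) (d : List Int), d.length = n → ∀ iv,
      ofb_encrypt_alt d key iv l = ofb_encrypt d key iv l := by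
  intro n
  induction n using Nat.strong_induction_on with
  | _ n ih =>
    intro d hd iv
    match d with
    | [] => simp [ofb_encrypt_alt, ofb_encrypt]
    | [m] =>
      simp [ofb_encrypt_alt, ofb_encrypt, ofbStep, pyEncrypt]
    | m₁ :: m₂ :: rest =>
      rw [ofb_encrypt_alt]
      have h0 : ¬ (m₁ :: m₂ :: rest).length = 0 := by simp
      have h1 : ¬ (m₁ :: m₂ :: rest).length = 1 := by simp
      simp only [h0, h1, if_false]
      set dd := m₁ :: m₂ :: rest with hdd
      set k := dd.length / 2 with hk
      have hk1 : 1 ≤ k := by simp [hk, hdd]; omega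
      have hk2 : k < dd.length := by simp [hk]; omega
      have ihl := ih (dd.take k).length (by subst hd; simp; omega) (dd.take k) rfl iv
      have ihr := ih (dd.drop k).length (by subst hd; simp; omega) (dd.drop k) rfl
        (dd.getD (k - 1) 0)
      rw [ihl, ihr]
      have hsplit := ofb_split key l (dd.take k) (dd.drop k) iv
      rw [List.take_append_drop] at hsplit
      rw [hsplit, getLastD_take dd k hk1 (le_of_lt hk2) iv 0]

-- ===== VERDICT (by name: the statement is the Claim_ definition above) =====
theorem ofb_encrypt_spec : Claim_equal_ofb_encrypt := by
  intro data key iv l _ _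
  unfold Spec_ofb_encrypt
  exact (alt_eq_ofb key l data.length data rfl iv).symm
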